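-- pv_equiv track=rewrite | github.com/ocirne/adventofcode | python/2020/day16.py | find_fields
-- ===== SOURCE A (Python) =====
-- def is_name_possible(index, tickets, my_range):
--     for ticket in tickets:
--         if ticket[index] not in my_range:
--             return False
--     return True
--
-- def find_fields(pinned, index, valid_tickets, ranges):
--     result = []
--     for name in ranges:
--         if name in pinned.values():
--             continue
--         if is_name_possible(index, valid_tickets, ranges[name]):
--             result.append(name)
--     return result
-- ===== SOURCE B (Python) =====
-- def find_fields(pinned, index, valid_tickets, ranges):
--     pinned_names = set(pinned.values())
--     candidates = [name for name in ranges if name not in pinned_names]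
--     for ticket in valid_tickets:
--         if not candidates:
--             break
--         value = ticket[index]
--         candidates = [name for name in candidates if value in ranges[name]]
--     return candidates
-- ===== Notes on version B (the rewrite author's own statement) =====
-- stated objective: alternative
-- what changed: Inverted the loop nesting: instead of testing each field name against all tickets (name-outer, ticket-inner with early exit), B builds the non-pinned candidate list once and makes a single elimination pass over the tickets, filtering the maintained candidate list by each ticket's value and stopping early when it empties.
import Mathlib
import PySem

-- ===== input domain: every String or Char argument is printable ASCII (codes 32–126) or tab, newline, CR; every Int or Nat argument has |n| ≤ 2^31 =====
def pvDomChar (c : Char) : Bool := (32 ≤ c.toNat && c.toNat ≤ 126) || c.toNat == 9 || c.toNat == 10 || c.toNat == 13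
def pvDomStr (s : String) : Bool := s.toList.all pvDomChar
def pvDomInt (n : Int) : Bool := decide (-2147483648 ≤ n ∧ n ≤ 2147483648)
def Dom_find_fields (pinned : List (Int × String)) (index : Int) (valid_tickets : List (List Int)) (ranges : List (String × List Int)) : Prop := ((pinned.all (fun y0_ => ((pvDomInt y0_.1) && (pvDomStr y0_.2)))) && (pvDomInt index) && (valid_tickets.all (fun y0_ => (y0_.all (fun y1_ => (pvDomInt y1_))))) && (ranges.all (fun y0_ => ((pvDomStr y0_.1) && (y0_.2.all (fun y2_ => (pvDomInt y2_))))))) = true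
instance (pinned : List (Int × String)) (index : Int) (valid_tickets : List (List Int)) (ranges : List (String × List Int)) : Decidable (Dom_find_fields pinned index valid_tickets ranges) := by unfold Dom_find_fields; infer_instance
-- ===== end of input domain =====

-- B inverts A's loop nesting: one elimination pass over the tickets narrowing a maintained
-- candidate list (stopping when it empties), instead of testing each name against all tickets.

-- ===== PORT A =====
-- 'ticket[index]' may raise IndexError; the helper returns none there (excluded by Pre_).
def is_name_possible (index : Int) (tickets : List (List Int)) (my_range : List Int) : Option Bool :=
  match tickets with
  | [] => some true
  | t :: rest =>
    match PySem.List.pyGet? t index with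
    | none => none
    | some v => if my_range.contains v then is_name_possible index rest my_range else some false

def find_fields (pinned : List (Int × String)) (index : Int) (valid_tickets : List (List Int)) (ranges : List (String × List Int)) : List String :=
  let rd := PySem.Dict.ofList ranges
  let pv := (PySem.Dict.ofList pinned).values
  let go : Option (List String) :=
    rd.keys.foldl (fun acc name =>
      match acc with
      | none => none
      | some result =>
        if pv.contains name then some result
        else
          match is_name_possible index valid_tickets (rd.getD name []) with
          | none => none
          | some b => if b then some (result ++ [name]) else some result) (some [])
  go.getD []  -- the none (IndexError) case is excluded by Pre_

-- ===== PORT B =====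
def find_fields_alt (pinned : List (Int × String)) (index : Int) (valid_tickets : List (List Int)) (ranges : List (String × List Int)) : List String :=
  let rd := PySem.Dict.ofList ranges
  let pinnedNames : PySem.Set String := PySem.Set.ofList (PySem.Dict.ofList pinned).values
  let cand0 := rd.keys.filter (fun n => !(PySem.Set.contains pinnedNames n))
  let go : Option (List String) :=
    valid_tickets.foldl (fun acc t =>
      match acc with
      | none => none
      | some cands =>
        if cands.isEmpty then some cands   -- 'if not candidates: break'
        else
          match PySem.List.pyGet? t index with
          | none => none
          | some v => some (cands.filter (fun n => (rd.getD n []).contains v))) (some cand0)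
  go.getD []  -- the none (IndexError) case is excluded by Pre_

-- ===== PRECONDITION & SPEC =====
-- For one name's range, the tickets are safe: whenever the name has survived every earlier
-- ticket, the next ticket has an element at 'index'.
def pvNameSafe (index : Int) (r : List Int) (ts : List (List Int)) : Prop :=
  ∀ k, k < ts.length →
    ((ts.take k).all (fun t => r.contains (PySem.List.pyGetD t index 0))) = true →
    PySem.Raise.InRange (ts.getD k []).length index

-- Pre_ excludes exactly the inputs on which A raises IndexError: those where some non-pinned
-- field name survives a prefix of the tickets and the next ticket is too short for 'index'
-- (B raises on exactly the same inputs).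
def Pre_find_fields (pinned : List (Int × String)) (index : Int) (valid_tickets : List (List Int)) (ranges : List (String × List Int)) : Prop :=
  ∀ n ∈ (PySem.Dict.ofList ranges).keys.filter
          (fun n => !((PySem.Dict.ofList pinned).values.contains n)),
    pvNameSafe index ((PySem.Dict.ofList ranges).getD n []) valid_tickets
instance (pinned : List (Int × String)) (index : Int) (valid_tickets : List (List Int)) (ranges : List (String × List Int)) : Decidable (Pre_find_fields pinned index valid_tickets ranges) := by unfold Pre_find_fields pvNameSafe; infer_instance

def pvWitness_find_fields : (List (Int × String)) × Int × List (List Int) × (List (String × List Int)) :=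
  ([(0, "a")], 1, [[3, 4], [5, 4]], [("a", [4, 5]), ("b", [4]), ("c", [7])])

def Spec_find_fields (pinned : List (Int × String)) (index : Int) (valid_tickets : List (List Int)) (ranges : List (String × List Int)) (out : List String) : Prop := out = find_fields_alt pinned index valid_tickets ranges
instance (pinned : List (Int × String)) (index : Int) (valid_tickets : List (List Int)) (ranges : List (String × List Int)) (out : List String) : Decidable (Spec_find_fields pinned index valid_tickets ranges out) := by unfold Spec_find_fields; infer_instance

-- ===== CLAIM (what is proved, stated in full; the proofs are below) =====
def Claim_equal_find_fields : Prop := ∀ (pinned : List (Int × String)) (index : Int) (valid_tickets : List (List Int)) (ranges : List (String × List Int)), Dom_find_fields pinned index valid_tickets ranges → Pre_find_fields pinned index valid_tickets ranges → Spec_find_fields pinned index valid_tickets ranges (find_fields pinned index valid_tickets ranges)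

-- ===== LEMMAS AND PROOFS =====

-- An in-range index makes xs[index] return its (total-form) value.
theorem pyGet?_eq_some_pyGetD (t : List Int) (index : Int)
    (ht : PySem.Raise.InRange t.length index) :
    PySem.List.pyGet? t index = some (PySem.List.pyGetD t index 0) := by
  have hnn : PySem.List.pyGet? t index ≠ none := by
    rw [Ne, PySem.List.pyGet?_eq_none_iff]
    exact not_not_intro ht
  obtain ⟨v, hv⟩ := Option.ne_none_iff_exists'.mp hnn
  rw [hv, PySem.List.pyGetD, hv, Option.getD_some]

-- pvNameSafe shifts past a ticket the name passes.
theorem pvNameSafe_head (index : Int) (r : List Int) (t : List Int) (rest : List (List Int))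
    (h : pvNameSafe index r (t :: rest)) : PySem.Raise.InRange t.length index := by
  have := h 0 (by simp) (by simp)
  simpa using this

theorem pvNameSafe_tail (index : Int) (r : List Int) (t : List Int) (rest : List (List Int))
    (h : pvNameSafe index r (t :: rest))
    (hp : r.contains (PySem.List.pyGetD t index 0) = true) :
    pvNameSafe index r rest := by
  intro k hk hpre
  have := h (k + 1) (by simpa using Nat.succ_lt_succ hk)
    (by rw [List.take_succ_cons, List.all_cons, hp, hpre]; rfl)
  simpa using this

-- Under pvNameSafe, A's inner scan over the tickets is the 'all tickets hit the range' test.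
theorem is_name_possible_eq (index : Int) (tickets : List (List Int)) (my_range : List Int)
    (h : pvNameSafe index my_range tickets) :
    is_name_possible index tickets my_range =
      some (tickets.all (fun t => my_range.contains (PySem.List.pyGetD t index 0))) := by
  induction tickets with
  | nil => rfl
  | cons t rest ih =>
    have hv := pyGet?_eq_some_pyGetD t index (pvNameSafe_head index my_range t rest h)
    cases hc : my_range.contains (PySem.List.pyGetD t index 0) with
    | true =>
      simp only [is_name_possible, hv, hc, if_true, List.all_cons, Bool.true_and]
      exact ih (pvNameSafe_tail index my_range t rest h hc)
    | false =>
      simp only [is_name_possible, hv, hc, Bool.false_eq_true, if_false, List.all_cons,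
        Bool.false_and]

-- A's fold over the names, from an accumulated result, appends exactly the filtered names.
theorem findA_foldl_eq (index : Int) (valid_tickets : List (List Int))
    (rd : PySem.Dict String (List Int)) (pv : List String) (names : List String) (res : List String)
    (h : ∀ n ∈ names, !pv.contains n → pvNameSafe index (rd.getD n []) valid_tickets) :
    names.foldl (fun acc name =>
      match acc with
      | none => none
      | some result =>
        if pv.contains name then some result
        else
          match is_name_possible index valid_tickets (rd.getD name []) with
          | none => none
          | some b => if b then some (result ++ [name]) else some result) (some res) =
    some (res ++ names.filter (fun n => !pv.contains n &&
        valid_tickets.all (fun t => (rd.getD n []).contains (PySem.List.pyGetD t index 0)))) := by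
  induction names generalizing res with
  | nil => simp
  | cons n ns ih =>
    cases hp : pv.contains n with
    | true =>
      simp only [List.foldl_cons, List.filter_cons, hp, if_true, Bool.not_true, Bool.false_and,
        Bool.false_eq_true, if_false]
      exact ih res (fun m hm hmp => h m (List.mem_cons_of_mem _ hm) hmp)
    | false =>
      have hn := is_name_possible_eq index valid_tickets (rd.getD n [])
        (h n (by simp) (by rw [hp]; rfl))
      cases hb : valid_tickets.all (fun t => (rd.getD n []).contains (PySem.List.pyGetD t index 0)) with
      | true =>
        simp only [List.foldl_cons, List.filter_cons, hp, hn, hb, Bool.false_eq_true, if_false,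
          if_true, Bool.not_false, Bool.true_and]
        rw [ih (res ++ [n]) (fun m hm hmp => h m (List.mem_cons_of_mem _ hm) hmp)]
        simp
      | false =>
        simp only [List.foldl_cons, List.filter_cons, hp, hn, hb, Bool.false_eq_true, if_false,
          Bool.not_false, Bool.true_and]
        exact ih res (fun m hm hmp => h m (List.mem_cons_of_mem _ hm) hmp)

-- Once the candidate list is empty, B's pass keeps it empty.
theorem findB_foldl_nil (index : Int) (tickets : List (List Int))
    (rd : PySem.Dict String (List Int)) :
    tickets.foldl (fun acc t =>
      match acc with
      | none => none
      | some cands =>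
        if cands.isEmpty then some cands
        else
          match PySem.List.pyGet? t index with
          | none => none
          | some v => some (cands.filter (fun n => (rd.getD n []).contains v)))
      (some ([] : List String)) = some [] := by
  induction tickets with
  | nil => rfl
  | cons t rest ih => simpa using ih

-- B's elimination pass over the tickets filters the candidates by the 'all tickets' test.
theorem findB_foldl_eq (index : Int) (tickets : List (List Int))
    (rd : PySem.Dict String (List Int)) (cands : List String)
    (h : ∀ n ∈ cands, pvNameSafe index (rd.getD n []) tickets) :
    tickets.foldl (fun acc t =>
      match acc with
      | none => none
      | some cands =>
        if cands.isEmpty then some cands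
        else
          match PySem.List.pyGet? t index with
          | none => none
          | some v => some (cands.filter (fun n => (rd.getD n []).contains v))) (some cands) =
    some (cands.filter (fun n =>
        tickets.all (fun t => (rd.getD n []).contains (PySem.List.pyGetD t index 0)))) := by
  induction tickets generalizing cands with
  | nil => simp
  | cons t rest ih =>
    cases cands with
    | nil => simpa using findB_foldl_nil index rest rd
    | cons c cs =>
      have hv := pyGet?_eq_some_pyGetD t index
        (pvNameSafe_head index (rd.getD c []) t rest (h c (by simp)))
      simp only [List.foldl_cons, List.isEmpty_cons, Bool.false_eq_true, if_false, hv]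
      rw [ih _ (fun n hn => by
        have hmem : n ∈ c :: cs := List.mem_of_mem_filter hn
        have hpass := (List.mem_filter.mp hn).2
        exact pvNameSafe_tail index (rd.getD n []) t rest (h n hmem) hpass)]
      rw [List.filter_filter]
      congr 1
      apply List.filter_congr
      intro n _
      rw [List.all_cons, Bool.and_comm]

-- Membership in set(pinned.values()) coincides with list membership in pinned.values().
theorem set_contains_values (pv : List String) (n : String) :
    PySem.Set.contains (PySem.Set.ofList pv) n = pv.contains n := by
  by_cases hn : n ∈ pv <;> simp [hn]

-- ===== VERDICT (by name: the statement is the Claim_ definition above) =====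
theorem find_fields_spec : Claim_equal_find_fields := by
  intro pinned index valid_tickets ranges _ hpre
  unfold Spec_find_fields
  show find_fields pinned index valid_tickets ranges = find_fields_alt pinned index valid_tickets ranges
  simp only [find_fields, find_fields_alt]
  have hpre' : ∀ n ∈ (PySem.Dict.ofList ranges).keys,
      !((PySem.Dict.ofList pinned).values.contains n) →
      pvNameSafe index ((PySem.Dict.ofList ranges).getD n []) valid_tickets := by
    intro n hn hnp
    exact hpre n (List.mem_filter.mpr ⟨hn, hnp⟩)
  rw [findA_foldl_eq index valid_tickets _ _ _ _ hpre',
      findB_foldl_eq index valid_tickets _ _ (fun n hn => by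
        have := List.mem_filter.mp (by
          simpa only [set_contains_values] using hn)
        exact hpre n (List.mem_filter.mpr this))]
  simp only [Option.getD_some, List.nil_append, List.filter_filter]
  apply List.filter_congr
  intro n _
  rw [set_contains_values, Bool.and_comm]
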